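-- pv_equiv track=rewrite | github.com/yaneurao/Pytra | test/py/case47_loop.py | calc_47
-- ===== SOURCE A (Python) =====
-- def calc_47(values: list[int]) -> int:
--     total: int = 0
--     for v in values:
--         if v % 2 == 0:
--             total += v
--         else:
--             total += (v * 2)
--     return total
-- ===== SOURCE B (Python) =====
-- def calc_47(values: list[int]) -> int:
--     # doubling an odd v equals v + v: total = sum of all + extra sum over odds
--     return sum(values) + sum(v for v in values if v % 2)
-- ===== Notes on version B (the rewrite author's own statement) =====
-- stated objective: simpler
-- what changed: Replaces the single branching accumulator loop with two builtin sums: sum of all values plus a second sum over just the odd values (doubling an odd v equals v + v).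
import Mathlib
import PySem

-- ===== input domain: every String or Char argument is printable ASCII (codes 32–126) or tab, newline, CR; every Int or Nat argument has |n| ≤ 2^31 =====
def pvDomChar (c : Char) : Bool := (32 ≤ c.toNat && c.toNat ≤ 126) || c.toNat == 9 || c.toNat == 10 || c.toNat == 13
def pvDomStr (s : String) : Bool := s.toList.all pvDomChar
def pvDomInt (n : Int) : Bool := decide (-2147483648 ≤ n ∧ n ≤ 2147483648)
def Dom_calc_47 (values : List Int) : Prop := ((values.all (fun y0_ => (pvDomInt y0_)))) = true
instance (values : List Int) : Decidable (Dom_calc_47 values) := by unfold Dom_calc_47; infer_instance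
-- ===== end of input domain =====

-- ===== PORT A =====
def calc_47 (values : List Int) : Int :=
  values.foldl (fun total v => if PySem.Int.mod v 2 = 0 then total + v else total + v * 2) 0

-- ===== PORT B =====
-- B: sum of all values plus a second sum over just the odd values
def calc_47_alt (values : List Int) : Int :=
  values.sum + (values.filter (fun v => PySem.Int.mod v 2 ≠ 0)).sum

-- ===== PRECONDITION & SPEC =====
def Spec_calc_47 (values : List Int) (out : Int) : Prop := out = calc_47_alt values
instance (values : List Int) (out : Int) : Decidable (Spec_calc_47 values out) := by unfold Spec_calc_47; infer_instance

-- ===== CLAIM (what is proved, stated in full; the proofs are below) =====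
def Claim_equal_calc_47 : Prop := ∀ (values : List Int), Dom_calc_47 values → Spec_calc_47 values (calc_47 values)

-- ===== LEMMAS AND PROOFS =====

-- ===== VERDICT (by name: the statement is the Claim_ definition above) =====
lemma calc47_fold_eq (values : List Int) (t : Int) :
    values.foldl (fun total v => if PySem.Int.mod v 2 = 0 then total + v else total + v * 2) t
      = t + values.sum + (values.filter (fun v => PySem.Int.mod v 2 ≠ 0)).sum := by
  induction values generalizing t with
  | nil => simp
  | cons v vs ih =>
    simp only [List.foldl_cons, List.filter_cons, List.sum_cons, ih]
    by_cases h : PySem.Int.mod v 2 = 0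
    · rw [if_pos h, if_neg (show ¬(decide (PySem.Int.mod v 2 ≠ 0) = true) by rw [h]; decide)]
      ring
    · rw [if_neg h, if_pos (decide_eq_true h), List.sum_cons]
      ring

theorem calc_47_spec : Claim_equal_calc_47 := by
  intro values _
  unfold Spec_calc_47 calc_47 calc_47_alt
  rw [calc47_fold_eq]
  ring
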